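-- pv_equiv track=rewrite | github.com/krixx646/AI_Services | accounts/validators.py | _domain_matches
-- ===== SOURCE A (Python) =====
-- def _domain_matches(disposable_set, domain: str) -> bool:
--     domain = domain.lower().strip('.')
--     # direct match
--     if domain in disposable_set:
--         return True
--     # subdomain match
--     parts = domain.split('.')
--     for i in range(1, len(parts)):
--         candidate = '.'.join(parts[i:])
--         if candidate in disposable_set:
--             return True
--     # wildcard suffix entries like *.tempmail.com
--     for entry in disposable_set:
--         if entry.startswith('*.') and domain.endswith(entry[2:]):
--             return True
--     return False
-- ===== SOURCE B (Python) =====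
-- def _domain_matches(disposable_set, domain: str) -> bool:
--     domain = domain.lower().strip('.')
--     for entry in disposable_set:
--         if entry.startswith('*.'):
--             if domain.endswith(entry[2:]):
--                 return True
--         elif domain == entry or domain.endswith('.' + entry):
--             return True
--     return False
-- ===== Notes on version B (the rewrite author's own statement) =====
-- stated objective: simpler
-- what changed: A generates every dot-suffix candidate of the domain (split + join per index) and looks each up in the set, plus a separate wildcard scan; B makes a single pass over the entries, testing each entry directly as an exact match, a '.'-anchored suffix, or a loose wildcard suffix.
import Mathlib
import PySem

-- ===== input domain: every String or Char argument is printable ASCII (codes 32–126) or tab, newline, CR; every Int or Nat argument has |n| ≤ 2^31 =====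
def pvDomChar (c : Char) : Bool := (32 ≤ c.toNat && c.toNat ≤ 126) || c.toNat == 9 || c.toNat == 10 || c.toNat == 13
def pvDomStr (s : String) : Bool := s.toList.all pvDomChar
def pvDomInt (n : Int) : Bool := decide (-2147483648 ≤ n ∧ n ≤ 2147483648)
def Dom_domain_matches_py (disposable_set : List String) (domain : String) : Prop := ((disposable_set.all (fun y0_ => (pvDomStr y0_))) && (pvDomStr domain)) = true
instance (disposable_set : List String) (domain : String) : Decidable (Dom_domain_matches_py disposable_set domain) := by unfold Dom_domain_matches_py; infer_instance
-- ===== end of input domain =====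

-- B replaces A's generated-suffix candidate loop plus separate wildcard scan by one pass over the
-- entries, testing each entry directly as an exact / dotted-suffix / wildcard-suffix match (simpler).

-- ===== PORT A =====
def domain_matches_py (disposable_set : List String) (domain : String) : Bool :=
  -- domain = domain.lower().strip('.')
  let d := PySem.Str.stripChars (PySem.Str.lower domain) "."
  -- direct match
  if disposable_set.contains d then true
  else
    -- subdomain match: parts = domain.split('.')  (sep "." is nonempty, so split? is `some`; getD [] never fires)
    let parts := (PySem.Str.split? d ".").getD []
    if (PySem.List.pyRange 1 (parts.length : Int) 1).any
        (fun i => disposable_set.contains (PySem.Str.join "." (PySem.List.slice parts (some i) none))) then true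
    else
      -- wildcard suffix entries like *.tempmail.com
      disposable_set.any (fun entry =>
        PySem.Str.startswith entry "*." && PySem.Str.endswith d (PySem.Str.slice entry (some 2) none))

-- ===== PORT B =====
def domain_matches_py_alt (disposable_set : List String) (domain : String) : Bool :=
  let d := PySem.Str.stripChars (PySem.Str.lower domain) "."
  disposable_set.any (fun entry =>
    if PySem.Str.startswith entry "*." then
      PySem.Str.endswith d (PySem.Str.slice entry (some 2) none)
    else
      d == entry || PySem.Str.endswith d ("." ++ entry))

-- ===== PRECONDITION & SPEC =====
def Spec_domain_matches_py (disposable_set : List String) (domain : String) (out : Bool) : Prop := out = domain_matches_py_alt disposable_set domain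
instance (disposable_set : List String) (domain : String) (out : Bool) : Decidable (Spec_domain_matches_py disposable_set domain out) := by unfold Spec_domain_matches_py; infer_instance

-- ===== CLAIM (what is proved, stated in full; the proofs are below) =====
def Claim_equal_domain_matches_py : Prop := ∀ (disposable_set : List String) (domain : String), Dom_domain_matches_py disposable_set domain → Spec_domain_matches_py disposable_set domain (domain_matches_py disposable_set domain)

-- ===== LEMMAS AND PROOFS =====

lemma pvSplitOnConsChar (c a : Char) (l : List Char) :
    List.splitOn c (a :: l) = if a = c then [] :: List.splitOn c l else (List.splitOn c l).modifyHead (List.cons a) := by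
  simp [List.splitOn, List.splitOnP_cons]

lemma pvSplitOnNeNil (c : Char) (l : List Char) : List.splitOn c l ≠ [] := by
  simp [List.splitOn]; exact List.splitOnP_ne_nil _ _

-- PySem.Chars.splitOn.go, run with enough fuel, is List.splitOn with the accumulators prepended.
lemma pvGoSpec (c : Char) : ∀ (fuel : ℕ) (l cur : List Char) (acc : List (List Char)), l.length < fuel →
    PySem.Chars.splitOn.go [c] fuel l cur acc
      = acc.reverse ++ (List.splitOn c l).modifyHead (fun x => cur.reverse ++ x) := by
  intro fuel
  induction fuel with
  | zero => intro l cur acc h; exact absurd h (by omega)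
  | succ f ih =>
    intro l cur acc h
    cases l with
    | nil =>
      rw [PySem.Chars.splitOn.go]
      · simp [List.splitOn_nil]
      · intro h; omega
    | cons a rest =>
      rw [PySem.Chars.splitOn.go]
      by_cases hca : c = a
      · subst hca
        have hpre : [c].isPrefixOf (c :: rest) = true := by
          simp [List.isPrefixOf]
        rw [if_pos hpre]
        rw [ih _ _ _ (by simpa using Nat.lt_of_succ_lt_succ h)]
        rw [pvSplitOnConsChar]
        simp
        exact congrFun List.modifyHead_id _
      · have hpre : [c].isPrefixOf (a :: rest) = false := by
          simp [List.isPrefixOf]; exact fun hh => hca hh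
        rw [if_neg (by simp [hpre])]
        rw [ih _ _ _ (by simpa using Nat.lt_of_succ_lt_succ h)]
        rw [pvSplitOnConsChar, if_neg (fun hh => hca hh.symm), List.modifyHead_modifyHead]
        have hfe : (fun x => (a :: cur).reverse ++ x) = ((fun x => cur.reverse ++ x) ∘ List.cons a) := by
          funext x; simp
        rw [hfe]

-- PySem's split on a single-character separator is Mathlib's List.splitOn.
lemma pvSplitOnSingle (cs : List Char) (c : Char) :
    PySem.Chars.splitOn cs [c] = List.splitOn c cs := by
  unfold PySem.Chars.splitOn
  rw [pvGoSpec c (cs.length + 1) cs [] [] (by omega)]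
  simp
  exact congrFun List.modifyHead_id _

-- The strings '.'.join(parts[k:]) for 1 ≤ k < len(parts) are exactly the suffixes of cs that
-- start right after an occurrence of '.'.
lemma pvSuffixIffDrop (cs e : List Char) :
    ('.' :: e) <:+ cs ↔ ∃ k : ℕ, 1 ≤ k ∧ k < (List.splitOn '.' cs).length ∧
      [('.' : Char)].intercalate ((List.splitOn '.' cs).drop k) = e := by
  induction cs with
  | nil =>
    simp [List.splitOn_nil]
  | cons a cs ih =>
    by_cases ha : a = '.'
    · subst ha
      rw [pvSplitOnConsChar, if_pos rfl]
      have hlen : 1 ≤ (List.splitOn '.' cs).length := List.length_pos_of_ne_nil (pvSplitOnNeNil _ _)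
      constructor
      · intro h
        rcases List.suffix_cons_iff.mp h with heq | hsuf
        · injection heq with _ he
          refine ⟨1, le_refl 1, by simp; omega, ?_⟩
          simp [List.intercalate_splitOn, he]
        · rcases ih.mp hsuf with ⟨k, h1, h2, h3⟩
          exact ⟨k + 1, by omega, by simp; omega, by simpa using h3⟩
      · rintro ⟨k, h1, h2, h3⟩
        obtain ⟨j, rfl⟩ : ∃ j, k = j + 1 := ⟨k - 1, by omega⟩
        simp only [List.drop_succ_cons] at h3
        simp only [List.length_cons] at h2
        rcases Nat.eq_zero_or_pos j with hj | hj
        · subst hj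
          simp only [List.drop_zero, List.intercalate_splitOn] at h3
          exact List.suffix_cons_iff.mpr (Or.inl (by rw [h3]))
        · exact List.suffix_cons_iff.mpr (Or.inr (ih.mpr ⟨j, hj, by omega, h3⟩))
    · rw [pvSplitOnConsChar, if_neg ha]
      obtain ⟨p0, P, hPe⟩ : ∃ p0 P, List.splitOn '.' cs = p0 :: P := by
        cases hsp : List.splitOn '.' cs with
        | nil => exact absurd hsp (pvSplitOnNeNil _ _)
        | cons x xs => exact ⟨x, xs, rfl⟩
      constructor
      · intro h
        rcases List.suffix_cons_iff.mp h with heq | hsuf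
        · injection heq with hha _
          exact absurd hha.symm ha
        · rcases ih.mp hsuf with ⟨k, h1, h2, h3⟩
          obtain ⟨j, rfl⟩ : ∃ j, k = j + 1 := ⟨k - 1, by omega⟩
          rw [hPe] at h2 h3
          refine ⟨j + 1, by omega, ?_, ?_⟩
          · simpa [hPe] using h2
          · simpa [hPe, List.drop_succ_cons] using h3
      · rintro ⟨k, h1, h2, h3⟩
        obtain ⟨j, rfl⟩ : ∃ j, k = j + 1 := ⟨k - 1, by omega⟩
        rw [hPe] at h2 h3
        simp only [List.modifyHead_cons, List.length_cons, List.drop_succ_cons] at h2 h3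
        refine List.suffix_cons_iff.mpr (Or.inr (ih.mpr ⟨j + 1, by omega, ?_, ?_⟩))
        · rw [hPe]; simpa using h2
        · rw [hPe]; simpa [List.drop_succ_cons] using h3

-- Per-entry agreement of the two match criteria (pure Prop form).
lemma pvEntryIff (d s : String) :
    (d = s ∨ ('.' :: s.toList) <:+ d.toList ∨ (['*', '.'] <+: s.toList ∧ s.toList.drop 2 <:+ d.toList))
      ↔ (if ['*', '.'] <+: s.toList then s.toList.drop 2 <:+ d.toList
         else (d = s ∨ ('.' :: s.toList) <:+ d.toList)) := by
  by_cases hw : ['*', '.'] <+: s.toList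
  · rw [if_pos hw]
    constructor
    · rintro (rfl | hs | ⟨_, h⟩)
      · exact List.drop_suffix 2 _
      · exact ((List.drop_suffix 2 _).trans (List.suffix_cons _ _)).trans hs
      · exact h
    · intro h
      exact Or.inr (Or.inr ⟨hw, h⟩)
  · rw [if_neg hw]
    constructor
    · rintro (h | h | ⟨h, _⟩)
      · exact Or.inl h
      · exact Or.inr h
      · exact absurd h hw
    · rintro (h | h)
      · exact Or.inl h
      · exact Or.inr (Or.inl h)

lemma pvStart (s : String) : (PySem.Str.startswith s "*.") = true ↔ ['*', '.'] <+: s.toList := by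
  simp [PySem.Str.startswith, PySem.Chars.startswith, List.isPrefixOf_iff_prefix]

lemma pvEndSlice (d s : String) :
    (PySem.Str.endswith d (PySem.Str.slice s (some 2) none)) = true ↔ s.toList.drop 2 <:+ d.toList := by
  simp [PySem.Str.endswith, PySem.Chars.endswith, List.isSuffixOf_iff_suffix]
  rw [PySem.List.slice_from _ (by norm_num)]
  exact Iff.rfl

-- B's per-entry test, characterised.
lemma pvFBIff (d s : String) :
    ((if PySem.Str.startswith s "*." then PySem.Str.endswith d (PySem.Str.slice s (some 2) none)
      else (d == s || PySem.Str.endswith d ("." ++ s))) = true)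
      ↔ (d = s ∨ ('.' :: s.toList) <:+ d.toList ∨ (['*', '.'] <+: s.toList ∧ s.toList.drop 2 <:+ d.toList)) := by
  rw [pvEntryIff]
  by_cases hw : ['*', '.'] <+: s.toList
  · rw [if_pos hw, if_pos ((pvStart s).mpr hw)]
    exact pvEndSlice d s
  · rw [if_neg hw, if_neg (fun h => hw ((pvStart s).mp h))]
    simp [Bool.or_eq_true, beq_iff_eq, PySem.Str.endswith, PySem.Chars.endswith,
      List.isSuffixOf_iff_suffix, String.toList_append]

lemma pvParts (d : String) :
    (PySem.Str.split? d ".").getD [] = (List.splitOn '.' d.toList).map String.ofList := by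
  simp [PySem.Str.split?, PySem.Chars.split?, pvSplitOnSingle]

lemma pvCand (i : Int) (hi : 0 ≤ i) (P : List (List Char)) :
    PySem.Str.join "." (PySem.List.slice (P.map String.ofList) (some i) none)
      = String.ofList ([('.' : Char)].intercalate (P.drop i.toNat)) := by
  rw [PySem.List.slice_from _ hi]
  simp [PySem.Str.join, PySem.Chars.join, List.map_drop, List.map_map, Function.comp_def]

lemma pvCollapse (a b c : Bool) :
    ((if a = true then true else if b = true then true else c) = true) ↔ (a = true ∨ b = true ∨ c = true) := by
  cases a <;> cases b <;> cases c <;> simp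

-- The two ports agree for every set of entries and every (already normalised) domain string.
lemma pvA_eq (S : List String) (d : String) :
    (if S.contains d then true
     else
       if (PySem.List.pyRange 1 (((PySem.Str.split? d ".").getD []).length : Int) 1).any
           (fun i => S.contains (PySem.Str.join "." (PySem.List.slice ((PySem.Str.split? d ".").getD []) (some i) none))) then true
       else S.any (fun entry =>
         PySem.Str.startswith entry "*." && PySem.Str.endswith d (PySem.Str.slice entry (some 2) none)))
    = S.any (fun entry =>
        if PySem.Str.startswith entry "*." then
          PySem.Str.endswith d (PySem.Str.slice entry (some 2) none)
        else
          d == entry || PySem.Str.endswith d ("." ++ entry)) := by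
  rw [Bool.eq_iff_iff, pvCollapse, pvParts]
  simp only [List.any_eq_true, List.contains_iff_mem, PySem.List.mem_pyRange_one,
    List.length_map, Bool.and_eq_true]
  constructor
  · rintro (hmem | ⟨i, ⟨hi1, hi2⟩, hin⟩ | ⟨s, hs, hw1, hw2⟩)
    · exact ⟨d, hmem, (pvFBIff d d).mpr (Or.inl rfl)⟩
    · rw [pvCand i (by omega)] at hin
      refine ⟨_, hin, (pvFBIff d _).mpr (Or.inr (Or.inl ?_))⟩
      rw [pvSuffixIffDrop]
      refine ⟨i.toNat, by omega, by omega, ?_⟩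
      simp [String.toList_ofList]
    · exact ⟨s, hs, (pvFBIff d s).mpr (Or.inr (Or.inr ⟨(pvStart s).mp hw1, (pvEndSlice d s).mp hw2⟩))⟩
  · rintro ⟨s, hs, hfb⟩
    rcases (pvFBIff d s).mp hfb with heq | hsuf | ⟨hw1, hw2⟩
    · exact Or.inl (heq ▸ hs)
    · rcases (pvSuffixIffDrop d.toList s.toList).mp hsuf with ⟨k, hk1, hk2, hk3⟩
      refine Or.inr (Or.inl ⟨(k : Int), ⟨by omega, by omega⟩, ?_⟩)
      rw [pvCand (k : Int) (by omega)]
      simpa [Int.toNat_natCast, hk3] using hs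
    · exact Or.inr (Or.inr ⟨s, hs, (pvStart s).mpr hw1, (pvEndSlice d s).mpr hw2⟩)

-- ===== VERDICT (by name: the statement is the Claim_ definition above) =====
theorem domain_matches_py_spec : Claim_equal_domain_matches_py := by
  intro S domain _
  show domain_matches_py S domain = domain_matches_py_alt S domain
  exact pvA_eq S (PySem.Str.stripChars (PySem.Str.lower domain) ".")
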